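-- pv_equiv track=rewrite | github.com/Darkho1e/Ecom | ai stu/main.py | find_string_duplicates
-- ===== SOURCE A (Python) =====
-- def find_string_duplicates(arr):
--     seen = set()
--     duplicates = []
--     i = 0
--     while i < len(arr):
--         if arr[i] in seen and arr[i] not in duplicates:
--             duplicates.append(arr[i])
--         seen.add(arr[i])
--         i += 1
--     return duplicates
-- ===== SOURCE B (Python) =====
-- def find_string_duplicates(arr):
--     return [x for i, x in enumerate(arr) if arr[:i].count(x) == 1]
-- ===== Notes on version B (the rewrite author's own statement) =====
-- stated objective: simpler
-- what changed: Replaces A's stateful scan (seen-set plus membership scan of the growing duplicates list) by a stateless comprehension that emits x at index i iff x occurs exactly once in the prefix arr[:i], i.e. at its second occurrence.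
import Mathlib
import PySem

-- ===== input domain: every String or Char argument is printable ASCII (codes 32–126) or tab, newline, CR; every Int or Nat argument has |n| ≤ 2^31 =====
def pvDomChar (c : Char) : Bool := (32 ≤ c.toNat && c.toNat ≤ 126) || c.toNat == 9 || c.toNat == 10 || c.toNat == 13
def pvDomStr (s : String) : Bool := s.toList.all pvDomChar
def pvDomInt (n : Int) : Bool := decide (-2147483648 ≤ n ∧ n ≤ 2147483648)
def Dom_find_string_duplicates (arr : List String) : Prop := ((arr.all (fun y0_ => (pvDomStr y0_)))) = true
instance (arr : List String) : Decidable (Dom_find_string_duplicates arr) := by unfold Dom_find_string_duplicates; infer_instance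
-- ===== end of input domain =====

-- B replaces A's stateful scan (seen-set plus membership scan of the growing duplicates
-- list) by a stateless comprehension emitting x at index i iff arr[:i].count(x) == 1,
-- i.e. at its second occurrence (objective: simpler).

-- ===== PORT A =====
-- while i < len(arr): if arr[i] in seen and arr[i] not in duplicates:
--   duplicates.append(arr[i]); seen.add(arr[i]); i += 1
def findA_loop (arr : List String) (seen : PySem.Set String) (dups : List String) (i : Nat) : List String :=
  if h : i < arr.length then
    findA_loop arr (PySem.Set.add seen arr[i])
      (if PySem.Set.contains seen arr[i] && !(dups.contains arr[i]) then dups ++ [arr[i]] else dups)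
      (i + 1)
  else dups
termination_by arr.length - i

def find_string_duplicates (arr : List String) : List String :=
  findA_loop arr PySem.Set.empty [] 0

-- ===== PORT B =====
-- return [x for i, x in enumerate(arr) if arr[:i].count(x) == 1]
def find_string_duplicates_alt (arr : List String) : List String :=
  ((PySem.List.enumerate arr 0).filter
      (fun p => PySem.List.count (PySem.List.slice arr none (some p.1)) p.2 == 1)).map (·.2)

-- ===== PRECONDITION & SPEC =====
def Spec_find_string_duplicates (arr : List String) (out : List String) : Prop := out = find_string_duplicates_alt arr
instance (arr : List String) (out : List String) : Decidable (Spec_find_string_duplicates arr out) := by unfold Spec_find_string_duplicates; infer_instance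

-- ===== CLAIM (what is proved, stated in full; the proofs are below) =====
def Claim_equal_find_string_duplicates : Prop := ∀ (arr : List String), Dom_find_string_duplicates arr → Spec_find_string_duplicates arr (find_string_duplicates arr)

-- ===== LEMMAS AND PROOFS =====

-- A's index loop, rephrased structurally on the remaining suffix of the list.
def findA_list (l : List String) (seen : PySem.Set String) (dups : List String) : List String :=
  match l with
  | [] => dups
  | x :: rest =>
      findA_list rest (PySem.Set.add seen x)
        (if PySem.Set.contains seen x && !(dups.contains x) then dups ++ [x] else dups)

theorem findA_loop_eq_list (arr : List String) (seen : PySem.Set String)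
    (dups : List String) (i : Nat) :
    findA_loop arr seen dups i = findA_list (arr.drop i) seen dups := by
  by_cases h : i < arr.length
  · rw [findA_loop, dif_pos h, List.drop_eq_getElem_cons h, findA_list,
      findA_loop_eq_list arr _ _ (i + 1)]
  · rw [findA_loop, dif_neg h, List.drop_eq_nil_of_le (by omega), findA_list]
termination_by arr.length - i

-- Main invariant: scanning the suffix with state summarising the prefix 'pre' produces
-- exactly the already-emitted dups followed by B's filter over the suffix.
theorem main_invariant (suf pre : List String) (seen : PySem.Set String) (dups : List String)
    (h1 : ∀ y, y ∈ seen ↔ 1 ≤ pre.count y)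
    (h2 : ∀ y, y ∈ dups ↔ 2 ≤ pre.count y) :
    findA_list suf seen dups =
      dups ++ ((PySem.List.enumerate suf (pre.length : Int)).filter
        (fun p => PySem.List.count (PySem.List.slice (pre ++ suf) none (some p.1)) p.2 == 1)).map (·.2) := by
  induction suf generalizing pre seen dups with
  | nil => simp [findA_list, PySem.List.enumerate_nil]
  | cons x rest ih =>
    rw [findA_list, PySem.List.enumerate_cons, List.filter_cons]
    have hslice : PySem.List.slice (pre ++ x :: rest) none (some (pre.length : Int)) = pre := by
      rw [PySem.List.slice_to_natCast, List.take_left]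
    have hcond : (PySem.Set.contains seen x && !(dups.contains x))
        = (PySem.List.count (PySem.List.slice (pre ++ x :: rest) none (some (pre.length : Int))) x == 1) := by
      rw [hslice, PySem.List.count_eq]
      have hs := h1 x
      have hd := h2 x
      rw [Bool.eq_iff_iff]
      simp only [Bool.and_eq_true, Bool.not_eq_eq_eq_not, Bool.not_true,
        List.contains_eq_mem, decide_eq_false_iff_not, PySem.Set.contains_iff,
        beq_iff_eq, hs, hd]
      omega
    have hpre' : ∀ y, (y ∈ PySem.Set.add seen x ↔ 1 ≤ (pre ++ [x]).count y) ∧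
        (y ∈ (if PySem.Set.contains seen x && !(dups.contains x) then dups ++ [x] else dups)
          ↔ 2 ≤ (pre ++ [x]).count y) := by
      intro y
      have hs := h1 y
      have hd := h2 y
      have hs' := h1 x
      have hd' := h2 x
      have hcnt : List.count y [x] = if y = x then 1 else 0 := by
        by_cases hy : y = x
        · simp [hy]
        · rw [if_neg hy]
          simp [List.count_eq_zero, hy]
      rw [List.count_append, hcnt]
      refine ⟨?_, ?_⟩
      · rw [PySem.Set.mem_add, hs]
        split_ifs with hy
        · subst hy; simp
        · simp [hy]
      · by_cases hy : y = x
        · subst hy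
          rw [if_pos rfl]
          split_ifs with hc
          · simp only [Bool.and_eq_true, Bool.not_eq_eq_eq_not, Bool.not_true,
              List.contains_eq_mem, decide_eq_false_iff_not, PySem.Set.contains_iff] at hc
            rw [hs', hd'] at hc
            simp [List.mem_append]
            simpa using hc.1
          · simp only [Bool.and_eq_true, Bool.not_eq_eq_eq_not, Bool.not_true,
              List.contains_eq_mem, decide_eq_false_iff_not, not_and, not_not,
              PySem.Set.contains_iff] at hc
            rw [hs', hd'] at hc
            rw [hd']
            omega
        · rw [if_neg hy]
          split_ifs with hc
          · simp [List.mem_append, hd, hy]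
          · rw [hd]
            omega
    have hstep := ih (pre ++ [x]) (PySem.Set.add seen x)
      (if PySem.Set.contains seen x && !(dups.contains x) then dups ++ [x] else dups)
      (fun y => (hpre' y).1) (fun y => (hpre' y).2)
    rw [List.append_assoc, List.singleton_append] at hstep
    have hlen : ((pre ++ [x]).length : Int) = (pre.length : Int) + 1 := by
      simp
    rw [hlen] at hstep
    rw [hstep]
    by_cases hc : (PySem.Set.contains seen x && !(dups.contains x)) = true
    · rw [if_pos hc, if_pos (by rw [← hcond]; exact of_decide_eq_true (by simpa using hc))]
      simp
    · rw [if_neg hc, if_neg (by rw [← hcond]; simpa using hc)]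

-- ===== VERDICT (by name: the statement is the Claim_ definition above) =====
theorem find_string_duplicates_spec : Claim_equal_find_string_duplicates := by
  intro arr _
  unfold Spec_find_string_duplicates find_string_duplicates find_string_duplicates_alt
  rw [findA_loop_eq_list, List.drop_zero]
  have h := main_invariant arr [] PySem.Set.empty []
    (by intro y; simp [PySem.Set.empty]) (by intro y; simp)
  simpa using h
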